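-- pv_equiv track=rewrite | github.com/pablocuadros19/NyPer | tablero-nacho/main.py | _formatear_historial
-- ===== SOURCE A (Python) =====
-- def _formatear_historial(movimientos, color_jugador, nombre_jugador):
--     """
--     Convierte la lista plana de jugadas en texto etiquetado.
--     Ejemplo: "1. Pablo: e4 | Oponente: e5  2. Pablo: Nf3 | Oponente: Nc6"
--     """
--     if not movimientos:
--         return "Partida recién iniciada."
--
--     jugador_es_blancas = color_jugador == "blancas"
--     lineas = []
--
--     for i in range(0, len(movimientos), 2):
--         num = i // 2 + 1
--         jug_blanca = movimientos[i] if i < len(movimientos) else "—"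
--         jug_negra  = movimientos[i + 1] if i + 1 < len(movimientos) else "—"
--
--         if jugador_es_blancas:
--             blanca_label = nombre_jugador
--             negra_label  = "Oponente"
--         else:
--             blanca_label = "Oponente"
--             negra_label  = nombre_jugador
--
--         lineas.append(f"{num}. {blanca_label}: {jug_blanca}  {negra_label}: {jug_negra}")
--
--     return " | ".join(lineas)
-- ===== SOURCE B (Python) =====
-- def _formatear_historial(movimientos, color_jugador, nombre_jugador):
--     """Pairwise decomposition: labels fixed once, then the move list is
--     consumed two entries at a time through an iterator (no index arithmetic)."""
--     if not movimientos:
--         return "Partida recién iniciada."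
--
--     if color_jugador == "blancas":
--         bl, ng = nombre_jugador, "Oponente"
--     else:
--         bl, ng = "Oponente", nombre_jugador
--
--     it = iter(movimientos)
--     lineas = [f"{num}. {bl}: {blanca}  {ng}: {next(it, '—')}"
--               for num, blanca in enumerate(it, 1)]
--     return " | ".join(lineas)
-- ===== Notes on version B (the rewrite author's own statement) =====
-- stated objective: alternative
-- what changed: Replaces the index loop over range(0, len, 2) with in-bounds tests and i//2 numbering by computing the two labels once and consuming the move list two entries at a time through an iterator, the odd-tail dash coming from next()'s default.
import Mathlib
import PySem

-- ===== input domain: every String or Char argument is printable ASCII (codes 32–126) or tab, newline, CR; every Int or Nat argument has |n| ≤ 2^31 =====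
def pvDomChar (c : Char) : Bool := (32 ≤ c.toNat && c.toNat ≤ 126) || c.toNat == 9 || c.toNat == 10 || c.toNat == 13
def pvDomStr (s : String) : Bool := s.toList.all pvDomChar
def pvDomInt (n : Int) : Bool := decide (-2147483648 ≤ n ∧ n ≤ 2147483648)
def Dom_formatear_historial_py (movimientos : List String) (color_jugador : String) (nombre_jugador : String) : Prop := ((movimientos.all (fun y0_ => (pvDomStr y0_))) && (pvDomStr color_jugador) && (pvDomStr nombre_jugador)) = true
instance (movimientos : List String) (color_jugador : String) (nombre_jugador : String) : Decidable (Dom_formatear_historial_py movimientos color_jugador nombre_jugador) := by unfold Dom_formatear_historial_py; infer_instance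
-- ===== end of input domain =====

-- B replaces A's index loop (range step 2, bounds tests, i//2 numbering) by a
-- pairwise recursion with the labels fixed once; same return value, alternative decomposition.

-- ===== PORT A =====
-- Literal transliteration of A: foldl over range(0, len(movimientos), 2),
-- indexing with in-bounds guards and numbering with i // 2 + 1.
def formatear_historial_py (movimientos : List String) (color_jugador : String) (nombre_jugador : String) : String :=
  if movimientos = [] then "Partida recién iniciada."
  else
    let jugador_es_blancas := color_jugador == "blancas"
    let lineas := (PySem.List.pyRange 0 (movimientos.length : Int) 2).foldl
      (fun lineas i =>
        let num := PySem.Int.floordiv i 2 + 1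
        let jug_blanca := if i < (movimientos.length : Int) then PySem.List.pyGetD movimientos i "—" else "—"
        let jug_negra := if i + 1 < (movimientos.length : Int) then PySem.List.pyGetD movimientos (i + 1) "—" else "—"
        let blanca_label := if jugador_es_blancas then nombre_jugador else "Oponente"
        let negra_label := if jugador_es_blancas then "Oponente" else nombre_jugador
        lineas ++ [PySem.Int.toStr num ++ ". " ++ blanca_label ++ ": " ++ jug_blanca ++ "  " ++ negra_label ++ ": " ++ jug_negra])
      []
    PySem.Str.join " | " lineas

-- ===== PORT B =====
-- B: labels fixed once, the move list consumed two entries at a time (Source B's iterator loop).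
def fmtGo (bl ng : String) : Int → List String → List String
  | _, [] => []
  | num, [w] => [PySem.Int.toStr num ++ ". " ++ bl ++ ": " ++ w ++ "  " ++ ng ++ ": " ++ "—"]
  | num, w :: b :: resto =>
      (PySem.Int.toStr num ++ ". " ++ bl ++ ": " ++ w ++ "  " ++ ng ++ ": " ++ b) :: fmtGo bl ng (num + 1) resto

def formatear_historial_py_alt (movimientos : List String) (color_jugador : String) (nombre_jugador : String) : String :=
  if movimientos = [] then "Partida recién iniciada."
  else
    let bl := if color_jugador == "blancas" then nombre_jugador else "Oponente"
    let ng := if color_jugador == "blancas" then "Oponente" else nombre_jugador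
    PySem.Str.join " | " (fmtGo bl ng 1 movimientos)

-- ===== PRECONDITION & SPEC =====
def Spec_formatear_historial_py (movimientos : List String) (color_jugador : String) (nombre_jugador : String) (out : String) : Prop := out = formatear_historial_py_alt movimientos color_jugador nombre_jugador
instance (movimientos : List String) (color_jugador : String) (nombre_jugador : String) (out : String) : Decidable (Spec_formatear_historial_py movimientos color_jugador nombre_jugador out) := by unfold Spec_formatear_historial_py; infer_instance

-- ===== CLAIM (what is proved, stated in full; the proofs are below) =====
def Claim_equal_formatear_historial_py : Prop := ∀ (movimientos : List String) (color_jugador : String) (nombre_jugador : String), Dom_formatear_historial_py movimientos color_jugador nombre_jugador → Spec_formatear_historial_py movimientos color_jugador nombre_jugador (formatear_historial_py movimientos color_jugador nombre_jugador)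

-- ===== LEMMAS AND PROOFS =====

theorem pyRange2_nil (a b : Int) (h : b ≤ a) : PySem.List.pyRange a b 2 = [] := by
  rw [PySem.List.pyRange_of_pos a b (by norm_num)]
  simp [show ¬ a < b by omega]

theorem pyRange2_cons (a b : Int) (h : a < b) :
    PySem.List.pyRange a b 2 = a :: PySem.List.pyRange (a + 2) b 2 := by
  rw [PySem.List.pyRange_of_pos a b (by norm_num),
      PySem.List.pyRange_of_pos (a + 2) b (by norm_num)]
  by_cases h2 : a + 2 < b
  · have hn : ((b - a + 2 - 1) / 2).toNat = ((b - (a + 2) + 2 - 1) / 2).toNat + 1 := by omega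
    simp only [if_pos h, if_pos h2, hn, List.range_succ_eq_map, List.map_cons, List.map_map]
    refine List.cons_eq_cons.mpr ⟨by norm_num, ?_⟩
    apply List.map_congr_left
    intro k _
    simp only [Function.comp_apply]
    push_cast
    ring
  · have hn : ((b - a + 2 - 1) / 2).toNat = 1 := by omega
    simp [if_pos h, hn, h2, List.range_succ]

theorem loop_eq (m : List String) (bl ng : String) (k : Nat) (acc : List String) :
    (PySem.List.pyRange (2 * (k : Int)) (m.length : Int) 2).foldl
      (fun lineas i =>
        let num := PySem.Int.floordiv i 2 + 1
        let jug_blanca := if i < (m.length : Int) then PySem.List.pyGetD m i "—" else "—"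
        let jug_negra := if i + 1 < (m.length : Int) then PySem.List.pyGetD m (i + 1) "—" else "—"
        lineas ++ [PySem.Int.toStr num ++ ". " ++ bl ++ ": " ++ jug_blanca ++ "  " ++ ng ++ ": " ++ jug_negra])
      acc
    = acc ++ fmtGo bl ng ((k : Int) + 1) (m.drop (2 * k)) := by
  by_cases hk : m.length ≤ 2 * k
  · rw [pyRange2_nil _ _ (by exact_mod_cast by omega)]
    simp [List.drop_eq_nil_of_le hk, fmtGo]
  · rw [Nat.not_le] at hk
    rw [pyRange2_cons _ _ (by exact_mod_cast hk)]
    have h2k : (2 * (k : Int)) + 2 = 2 * ((k + 1 : Nat) : Int) := by push_cast; ring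
    have hdrop : m.drop (2 * k) = m[2 * k] :: m.drop (2 * k + 1) := List.drop_eq_getElem_cons hk
    have hnum : PySem.Int.floordiv (2 * (k : Int)) 2 + 1 = (k : Int) + 1 := by
      simp [PySem.Int.floordiv]
    have hb : PySem.List.pyGetD m (2 * (k : Int)) "—" = m[2 * k] := by
      rw [PySem.List.pyGetD_eq_getElem m "—" (by positivity) (by exact_mod_cast hk)]
      congr 1
    by_cases hodd : 2 * k + 1 < m.length
    · -- two moves in this round
      have hdrop2 : m.drop (2 * k + 1) = m[2 * k + 1] :: m.drop (2 * k + 2) :=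
        List.drop_eq_getElem_cons hodd
      have hn : PySem.List.pyGetD m (2 * (k : Int) + 1) "—" = m[2 * k + 1] := by
        rw [PySem.List.pyGetD_eq_getElem m "—" (by positivity) (by exact_mod_cast hodd)]
        congr 1
      rw [List.foldl_cons]
      simp only [if_pos (show (2 * (k : Int)) < (m.length : Int) from by exact_mod_cast hk),
        if_pos (show (2 * (k : Int)) + 1 < (m.length : Int) from by exact_mod_cast hodd),
        hnum, hb, hn]
      rw [h2k, loop_eq m bl ng (k + 1)]
      rw [hdrop, hdrop2, fmtGo]
      simp [List.append_assoc, Nat.mul_succ]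
    · -- odd tail: the black move is the dash
      have hlen : m.length = 2 * k + 1 := by omega
      have hnone : ¬ ((2 * (k : Int)) + 1 < (m.length : Int)) := by exact_mod_cast by omega
      rw [List.foldl_cons]
      simp only [if_pos (show (2 * (k : Int)) < (m.length : Int) from by exact_mod_cast hk),
        if_neg hnone, hnum, hb]
      rw [h2k, loop_eq m bl ng (k + 1)]
      have : m.drop (2 * (k + 1)) = [] := List.drop_eq_nil_of_le (by omega)
      rw [hdrop, this, show m.drop (2 * k + 1) = [] from List.drop_eq_nil_of_le (by omega), fmtGo]
      simp [fmtGo]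
termination_by m.length - 2 * k

-- ===== VERDICT (by name: the statement is the Claim_ definition above) =====
theorem formatear_historial_py_spec : Claim_equal_formatear_historial_py := by
  intro movimientos color_jugador nombre_jugador _
  unfold Spec_formatear_historial_py formatear_historial_py formatear_historial_py_alt
  by_cases h : movimientos = []
  · simp [h]
  · simp only [if_neg h]
    by_cases hc : color_jugador == "blancas"
    · simp only [hc, if_true]
      refine congrArg (PySem.Str.join " | ") ?_
      have h0 := loop_eq movimientos nombre_jugador "Oponente" 0 []
      simp only [Nat.cast_zero, mul_zero, List.drop_zero, List.nil_append, zero_add] at h0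
      exact h0
    · simp only [hc, Bool.false_eq_true, if_false]
      refine congrArg (PySem.Str.join " | ") ?_
      have h0 := loop_eq movimientos "Oponente" nombre_jugador 0 []
      simp only [Nat.cast_zero, mul_zero, List.drop_zero, List.nil_append, zero_add] at h0
      exact h0
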